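-- pv_equiv track=rewrite | github.com/cwshugg/plado | src/utils/colors.py | color_hash
-- ===== SOURCE A (Python) =====
-- def color_hash(s):
--     """
--     Takes in a string and uses it to generate a pseudo-random, deterministic,
--     color escape sequence.
--     """
--     s = str(s)
--     if len(s) == 0 or s.lower() == "none":
--         return "\033[38;2;128;128;128m"
--
--     # simple helper function for quickly hashing a string
--     def color_hash_helper(txt):
--         result = 0
--         for c in txt:
--             result = ((result * 1237) ^ (ord(c) * 593)) & 0xffffffff
--         return result
--
--     # split the string into (roughly) thirds, then use each to generate a random
--     # 0-255 value (for red, green, and blue)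
--     third = int(len(s) / 3)
--     red = (color_hash_helper(s[0:third]) % 128) + 128
--     green = (color_hash_helper(s[third:(third * 2)]) % 128) + 128
--     blue = (color_hash_helper(s[(third * 2):len(s)]) % 128) + 128
--     return "\033[38;2;%d;%d;%dm" % (red, green, blue)
-- ===== SOURCE B (Python) =====
-- def color_hash(s):
--     """Single left-to-right pass over the string with three accumulators,
--     bucketed by index, instead of three separate hash calls on slices."""
--     s = str(s)
--     if len(s) == 0 or s.lower() == "none":
--         return "\033[38;2;128;128;128m"
--     third = len(s) // 3
--     acc = [0, 0, 0]
--     for i, c in enumerate(s):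
--         k = 0 if i < third else (1 if i < 2 * third else 2)
--         acc[k] = ((acc[k] * 1237) ^ (ord(c) * 593)) & 0xffffffff
--     return "\033[38;2;%d;%d;%dm" % tuple(a % 128 + 128 for a in acc)
-- ===== Notes on version B (the rewrite author's own statement) =====
-- stated objective: alternative
-- what changed: Replaces A's three separate hash calls on three string slices with a single left-to-right pass over the whole string that routes each character by index into one of three accumulators.
import Mathlib
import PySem

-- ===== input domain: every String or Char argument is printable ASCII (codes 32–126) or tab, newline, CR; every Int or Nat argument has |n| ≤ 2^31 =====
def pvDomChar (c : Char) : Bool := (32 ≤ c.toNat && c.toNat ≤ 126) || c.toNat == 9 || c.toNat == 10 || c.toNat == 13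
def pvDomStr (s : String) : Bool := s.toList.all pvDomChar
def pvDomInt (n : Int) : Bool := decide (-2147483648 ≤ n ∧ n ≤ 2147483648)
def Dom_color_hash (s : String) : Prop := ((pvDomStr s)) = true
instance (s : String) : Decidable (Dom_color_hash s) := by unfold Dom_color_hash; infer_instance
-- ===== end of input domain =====

-- B fuses A's three slice hashes into one indexed pass with three accumulators (alternative decomposition, same cost).

-- ===== PORT A =====
-- A's inner helper color_hash_helper: result = ((result*1237) ^ (ord(c)*593)) & 0xffffffff over txt
def pvAHelper (txt : List Char) : Nat :=
  txt.foldl (fun result c => ((result * 1237) ^^^ (c.toNat * 593)) &&& 0xffffffff) 0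

def color_hash (s : String) : String :=
  let cs := s.toList
  if cs.length = 0 ∨ PySem.Chars.lower cs = "none".toList then
    "\x1b[38;2;128;128;128m"
  else
    -- third = int(len(s)/3): exact as Nat division here (len ≥ 0, well below float limits)
    let third : Nat := cs.length / 3
    let red   := (pvAHelper (PySem.List.slice cs (some 0) (some (third : Int))) % 128) + 128
    let green := (pvAHelper (PySem.List.slice cs (some (third : Int)) (some ((third * 2 : Nat) : Int))) % 128) + 128
    let blue  := (pvAHelper (PySem.List.slice cs (some ((third * 2 : Nat) : Int)) (some (cs.length : Int))) % 128) + 128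
    "\x1b[38;2;" ++ PySem.Int.toStr (red : Int) ++ ";" ++ PySem.Int.toStr (green : Int)
      ++ ";" ++ PySem.Int.toStr (blue : Int) ++ "m"

-- ===== PORT B =====
-- B's loop: for i, c in enumerate(s), update the accumulator chosen by the index bucket
def pvBLoop (third : Nat) : List Char → Nat → Nat → Nat → Nat → Nat × Nat × Nat
  | [], _, r, g, b => (r, g, b)
  | c :: cs, i, r, g, b =>
    if i < third then
      pvBLoop third cs (i + 1) (((r * 1237) ^^^ (c.toNat * 593)) &&& 0xffffffff) g b
    else if i < 2 * third then
      pvBLoop third cs (i + 1) r (((g * 1237) ^^^ (c.toNat * 593)) &&& 0xffffffff) b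
    else
      pvBLoop third cs (i + 1) r g (((b * 1237) ^^^ (c.toNat * 593)) &&& 0xffffffff)

def color_hash_alt (s : String) : String :=
  let cs := s.toList
  if cs.length = 0 ∨ PySem.Chars.lower cs = "none".toList then
    "\x1b[38;2;128;128;128m"
  else
    let third : Nat := cs.length / 3
    let acc := pvBLoop third cs 0 0 0 0
    "\x1b[38;2;" ++ PySem.Int.toStr ((acc.1 % 128 + 128 : Nat) : Int) ++ ";"
      ++ PySem.Int.toStr ((acc.2.1 % 128 + 128 : Nat) : Int) ++ ";"
      ++ PySem.Int.toStr ((acc.2.2 % 128 + 128 : Nat) : Int) ++ "m"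

-- ===== PRECONDITION & SPEC =====
def Spec_color_hash (s : String) (out : String) : Prop := out = color_hash_alt s
instance (s : String) (out : String) : Decidable (Spec_color_hash s out) := by unfold Spec_color_hash; infer_instance

-- ===== CLAIM (what is proved, stated in full; the proofs are below) =====
def Claim_equal_color_hash : Prop := ∀ (s : String), Dom_color_hash s → Spec_color_hash s (color_hash s)

-- ===== LEMMAS AND PROOFS =====

theorem pvBLoop_append (third : Nat) (xs ys : List Char) (i r g b : Nat) :
    pvBLoop third (xs ++ ys) i r g b =
      pvBLoop third ys (i + xs.length) (pvBLoop third xs i r g b).1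
        (pvBLoop third xs i r g b).2.1 (pvBLoop third xs i r g b).2.2 := by
  induction xs generalizing i r g b with
  | nil => simp [pvBLoop]
  | cons c cs ih =>
    simp only [List.cons_append, pvBLoop, List.length_cons]
    have harith : i + (cs.length + 1) = (i + 1) + cs.length := by omega
    split_ifs <;> rw [ih] <;> rw [harith]

theorem pvBLoop_red (third : Nat) (cs : List Char) (i r g b : Nat)
    (h : i + cs.length ≤ third) :
    pvBLoop third cs i r g b =
      (cs.foldl (fun x c => ((x * 1237) ^^^ (c.toNat * 593)) &&& 0xffffffff) r, g, b) := by
  induction cs generalizing i r with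
  | nil => simp [pvBLoop]
  | cons c cs ih =>
    simp only [List.length_cons] at h
    simp only [pvBLoop, if_pos (by omega : i < third), List.foldl_cons]
    exact ih (i + 1) _ (by omega)

theorem pvBLoop_green (third : Nat) (cs : List Char) (i r g b : Nat)
    (h1 : third ≤ i) (h2 : i + cs.length ≤ 2 * third) :
    pvBLoop third cs i r g b =
      (r, cs.foldl (fun x c => ((x * 1237) ^^^ (c.toNat * 593)) &&& 0xffffffff) g, b) := by
  induction cs generalizing i g with
  | nil => simp [pvBLoop]
  | cons c cs ih =>
    simp only [List.length_cons] at h2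
    simp only [pvBLoop, if_neg (by omega : ¬ i < third), if_pos (by omega : i < 2 * third),
      List.foldl_cons]
    exact ih (i + 1) _ (by omega) (by omega)

theorem pvBLoop_blue (third : Nat) (cs : List Char) (i r g b : Nat)
    (h : 2 * third ≤ i) :
    pvBLoop third cs i r g b =
      (r, g, cs.foldl (fun x c => ((x * 1237) ^^^ (c.toNat * 593)) &&& 0xffffffff) b) := by
  induction cs generalizing i b with
  | nil => simp [pvBLoop]
  | cons c cs ih =>
    simp only [pvBLoop, if_neg (by omega : ¬ i < third), if_neg (by omega : ¬ i < 2 * third),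
      List.foldl_cons]
    exact ih (i + 1) _ (by omega)

-- the single pass equals the three slice hashes
theorem pvBLoop_eq (cs : List Char) :
    pvBLoop (cs.length / 3) cs 0 0 0 0 =
      (pvAHelper (cs.take (cs.length / 3)),
       pvAHelper ((cs.drop (cs.length / 3)).take (cs.length / 3)),
       pvAHelper (cs.drop (2 * (cs.length / 3)))) := by
  set t := cs.length / 3 with ht
  have hsplit : cs.drop t = (cs.drop t).take t ++ (cs.drop t).drop t :=
    (List.take_append_drop _ _).symm
  have hdecomp : cs = cs.take t ++ ((cs.drop t).take t ++ cs.drop (2 * t)) := by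
    rw [show 2 * t = t + t from by ring, ← List.drop_drop, ← hsplit, List.take_append_drop]
  have hlen3 : 3 * t ≤ cs.length := by
    rw [ht]; omega
  have hlen1 : (cs.take t).length = t := by
    simp [List.length_take]; omega
  have hlen2 : ((cs.drop t).take t).length = t := by
    simp [List.length_take, List.length_drop]; omega
  conv_lhs => rw [hdecomp]
  rw [pvBLoop_append, hlen1]
  rw [pvBLoop_red t (cs.take t) 0 0 0 0 (by omega)]
  rw [pvBLoop_append, hlen2]
  rw [pvBLoop_green t ((cs.drop t).take t) (0 + t) _ _ _ (by omega) (by omega)]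
  rw [pvBLoop_blue t (cs.drop (2 * t)) (0 + t + t) _ _ _ (by omega)]
  simp [pvAHelper]

-- ===== VERDICT (by name: the statement is the Claim_ definition above) =====
theorem color_hash_spec : Claim_equal_color_hash := by
  intro s _
  unfold Spec_color_hash color_hash color_hash_alt
  set cs := s.toList with hcs
  by_cases hguard : cs.length = 0 ∨ PySem.Chars.lower cs = "none".toList
  · rw [if_pos hguard, if_pos hguard]
  · simp only [if_neg hguard]
    set t := cs.length / 3 with ht
    have hlen3 : 3 * t ≤ cs.length := by omega
    have hs1 : PySem.List.slice cs (some ((0 : Nat) : Int)) (some (t : Int)) = cs.take t := by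
      rw [PySem.List.slice_natCast]; simp
    have hs2 : PySem.List.slice cs (some (t : Int)) (some ((t * 2 : Nat) : Int))
        = (cs.drop t).take t := by
      rw [PySem.List.slice_natCast]; congr 1; omega
    have hs3 : PySem.List.slice cs (some ((t * 2 : Nat) : Int)) (some (cs.length : Int))
        = cs.drop (2 * t) := by
      rw [PySem.List.slice_natCast]
      rw [(by omega : t * 2 = 2 * t)]
      exact List.take_of_length_le (by simp [List.length_drop])
    rw [show ((0 : Int)) = ((0 : Nat) : Int) by norm_num] at *
    rw [hs1, hs2, hs3, pvBLoop_eq]
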